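-- pv_equiv track=rewrite | github.com/Nirb8/throne | old_shuffle.py | deal
-- ===== SOURCE A (Python) =====
-- def deal(num_players, deck):
--     num_cards_per_player = len(deck) // num_players
--     hands = []
--     deck_list = list(deck.values())
--     for i in range(num_players):
--         hand = deck_list[i * num_cards_per_player: (i + 1) * num_cards_per_player]
--         hands.append(hand)
--     leftover = deck_list[num_players * num_cards_per_player:]
--
--     return hands, leftover
-- ===== SOURCE B (Python) =====
-- def deal(num_players, deck):
--     q = len(deck) // num_players
--     hands = [[] for _ in range(num_players)]
--     if q == 0:
--         return hands, list(deck.values())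
--     leftover = []
--     for i, card in enumerate(deck.values()):
--         p = i // q
--         if p < num_players:
--             hands[p].append(card)
--         else:
--             leftover.append(card)
--     return hands, leftover
-- ===== Notes on version B (the rewrite author's own statement) =====
-- stated objective: alternative
-- what changed: Replaces A's per-player slicing loop (one slice of the deck list per player plus a final leftover slice) by a single pass over the enumerated deck that routes card i to hand i // q or to the leftover, with a q == 0 short-circuit.
-- outside the precondition, e.g. on deal(-1, {'a': 'x'}): A returns ([], []), B returns ([], ['x']); on deal(0, {'a': 'x'}): A raises ZeroDivisionError, B raises ZeroDivisionError
import Mathlib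
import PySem

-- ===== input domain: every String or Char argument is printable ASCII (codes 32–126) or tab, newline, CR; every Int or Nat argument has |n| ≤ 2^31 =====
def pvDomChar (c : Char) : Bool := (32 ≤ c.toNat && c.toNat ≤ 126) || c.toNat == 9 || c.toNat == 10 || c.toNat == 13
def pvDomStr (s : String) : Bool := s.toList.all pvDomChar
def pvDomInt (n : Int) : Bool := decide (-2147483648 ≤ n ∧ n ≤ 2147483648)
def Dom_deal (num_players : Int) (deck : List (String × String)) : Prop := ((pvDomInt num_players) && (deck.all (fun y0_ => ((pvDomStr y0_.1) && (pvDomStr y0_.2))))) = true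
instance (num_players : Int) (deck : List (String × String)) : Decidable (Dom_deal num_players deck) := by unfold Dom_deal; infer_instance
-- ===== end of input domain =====

-- B replaces A's per-player slicing loop by one pass over the enumerated deck that routes
-- each card to hand i // q (q = cards per player) or to the leftover; same return value on
-- the natural domain num_players ≥ 1 (objective: alternative, not claimed faster).

-- ===== PORT A =====
def deal (num_players : Int) (deck : List (String × String)) : List (List String) × List String :=
  let num_cards_per_player := PySem.Int.floordiv (deck.length : Int) num_players
  let deck_list := deck.map (fun p => p.2)
  let hands := (PySem.List.pyRange 0 num_players 1).foldl
    (fun hands i =>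
      hands ++ [PySem.List.slice deck_list (some (i * num_cards_per_player)) (some ((i + 1) * num_cards_per_player))]) []
  let leftover := PySem.List.slice deck_list (some (num_players * num_cards_per_player)) none
  (hands, leftover)

-- ===== PORT B =====
-- loop body of Source B's single pass (p ≥ 0 inside the loop, so .toNat is exact for the Python index)
def dealStep (num_players q : Int) (st : List (List String) × List String) (p : Int × String) :
    List (List String) × List String :=
  let pi := PySem.Int.floordiv p.1 q
  if pi < num_players then (st.1.modify pi.toNat (fun h => h ++ [p.2]), st.2)
  else (st.1, st.2 ++ [p.2])

def deal_alt (num_players : Int) (deck : List (String × String)) : List (List String) × List String :=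
  let q := PySem.Int.floordiv (deck.length : Int) num_players
  let hands := (PySem.List.pyRange 0 num_players 1).map (fun _ => ([] : List String))
  if q == 0 then (hands, deck.map (fun p => p.2))
  else (PySem.List.enumerate (deck.map (fun p => p.2)) 0).foldl (dealStep num_players q) (hands, [])

-- ===== PRECONDITION & SPEC =====
-- Pre_ keeps the task's natural domain num_players ≥ 1: num_players = 0 raises ZeroDivisionError
-- in both programs, and a negative number of players is outside the task's natural domain (there
-- A returns ([], deck_list[num_players*q:]), a corner neither caller would specify, and B does not mimic it).
def Pre_deal (num_players : Int) (deck : List (String × String)) : Prop := 1 ≤ num_players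
instance (num_players : Int) (deck : List (String × String)) : Decidable (Pre_deal num_players deck) := by unfold Pre_deal; infer_instance
def pvWitness_deal : Int × (List (String × String)) := (2, [("a", "x"), ("b", "y"), ("c", "z")])
def Spec_deal (num_players : Int) (deck : List (String × String)) (out : List (List String) × List String) : Prop := out = deal_alt num_players deck
instance (num_players : Int) (deck : List (String × String)) (out : List (List String) × List String) : Decidable (Spec_deal num_players deck out) := by unfold Spec_deal; infer_instance

-- ===== CLAIM (what is proved, stated in full; the proofs are below) =====
def Claim_equal_deal : Prop := ∀ (num_players : Int) (deck : List (String × String)), Dom_deal num_players deck → Pre_deal num_players deck → Spec_deal num_players deck (deal num_players deck)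

-- ===== LEMMAS AND PROOFS =====

-- hand j after the first m cards have been dealt
def gHand (dl : List String) (q m j : Nat) : List String := ((dl.take m).drop (j * q)).take q

theorem foldlA (dl : List String) (q : Int) :
    ∀ (xs : List Int) (init : List (List String)),
      xs.foldl (fun hands i =>
          hands ++ [PySem.List.slice dl (some (i * q)) (some ((i + 1) * q))]) init =
        init ++ xs.map (fun i => PySem.List.slice dl (some (i * q)) (some ((i + 1) * q))) := by
  intro xs
  induction xs with
  | nil => intro init; simp
  | cons x xs ih => intro init; simp [List.foldl_cons, ih]

theorem slice_zero_zero (dl : List String) : PySem.List.slice dl (some 0) (some 0) = [] := by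
  rw [PySem.List.slice_toNat dl le_rfl le_rfl]
  simp

theorem slice_zero_none (dl : List String) : PySem.List.slice dl (some 0) none = dl := by
  rw [PySem.List.slice_from dl le_rfl]
  simp

theorem sliceA (dl : List String) (j q : Nat) :
    PySem.List.slice dl (some ((j : Int) * (q : Int))) (some (((j : Int) + 1) * (q : Int))) =
      (dl.drop (j * q)).take q := by
  have h1 : (j : Int) * (q : Int) = ((j * q : Nat) : Int) := by push_cast; ring
  have h2 : ((j : Int) + 1) * (q : Int) = ((j * q + q : Nat) : Int) := by push_cast; ring
  rw [h1, h2, PySem.List.slice_natCast]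
  congr 1
  omega

theorem sliceFrom (dl : List String) (N q : Nat) :
    PySem.List.slice dl (some ((N : Int) * (q : Int))) none = dl.drop (N * q) := by
  have h1 : (N : Int) * (q : Int) = ((N * q : Nat) : Int) := by push_cast; ring
  rw [h1, PySem.List.slice_from_natCast]

theorem initB (N : Nat) :
    (PySem.List.pyRange 0 (N : Int) 1).map (fun _ => ([] : List String)) =
      List.replicate N [] := by
  rw [PySem.List.pyRange_one, List.map_map]
  simp [Function.comp_def, List.map_const']

theorem gHand_of_le (dl : List String) (q m j : Nat) (h : j * q + q ≤ m) :
    gHand dl q m j = (dl.drop (j * q)).take q := by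
  unfold gHand
  rw [List.drop_take, List.take_take]
  congr 1
  omega

theorem gHand_of_ge (dl : List String) (q m j : Nat) (h : m ≤ j * q) :
    gHand dl q m j = [] := by
  unfold gHand
  rw [List.drop_take]
  have : m - j * q = 0 := by omega
  simp [this]

theorem gHand_mid (dl : List String) (q m j : Nat) (h1 : j * q ≤ m) (h2 : m < j * q + q)
    (hm : m < dl.length) :
    gHand dl q (m + 1) j = gHand dl q m j ++ [dl[m]] := by
  unfold gHand
  rw [List.drop_take, List.drop_take, List.take_take, List.take_take]
  have e1 : min q (m + 1 - j * q) = m + 1 - j * q := by omega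
  have e2 : min q (m - j * q) = m - j * q := by omega
  rw [e1, e2]
  have e3 : m + 1 - j * q = (m - j * q) + 1 := by omega
  have hlt : m - j * q < (dl.drop (j * q)).length := by
    rw [List.length_drop]; omega
  rw [e3, List.take_succ, List.getElem?_eq_getElem hlt]
  simp only [Option.toList_some, List.getElem_drop]
  simp only [show j * q + (m - j * q) = m by omega]

theorem drop_take_succ (dl : List String) (a m : Nat) (h : a ≤ m) (hm : m < dl.length) :
    (dl.take (m + 1)).drop a = (dl.take m).drop a ++ [dl[m]] := by
  rw [List.drop_take, List.drop_take]
  have e3 : m + 1 - a = (m - a) + 1 := by omega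
  have hlt : m - a < (dl.drop a).length := by rw [List.length_drop]; omega
  rw [e3, List.take_succ, List.getElem?_eq_getElem hlt]
  simp only [Option.toList_some, List.getElem_drop]
  simp only [show a + (m - a) = m by omega]

theorem deal_inv (dl : List String) (N q : Nat) (hq : 0 < q) :
    ∀ m, m ≤ dl.length →
      (PySem.List.enumerate (dl.take m) 0).foldl (dealStep (N : Int) (q : Int))
          (List.replicate N [], []) =
        ((List.range N).map (fun j => gHand dl q m j), (dl.take m).drop (N * q)) := by
  intro m
  induction m with
  | zero =>
    intro _
    simp [gHand, List.map_const']
  | succ m ih =>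
    intro hm1
    have hm : m < dl.length := by omega
    have htake : dl.take (m + 1) = dl.take m ++ [dl[m]] := by
      rw [List.take_succ, List.getElem?_eq_getElem hm]; rfl
    rw [htake, PySem.List.enumerate_append, List.foldl_append, ih (by omega)]
    have hlen : (dl.take m).length = m := List.length_take_of_le (by omega)
    simp only [hlen, PySem.List.enumerate, List.foldl_cons, List.foldl_nil]
    have hdm := Nat.div_add_mod' m q
    have hmod := Nat.mod_lt m hq
    have hjq1 : m / q * q ≤ m := by omega
    have hjq2 : m < m / q * q + q := by omega
    unfold dealStep
    simp only [zero_add, PySem.Int.floordiv_natCast, Int.toNat_natCast, Nat.cast_lt]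
    by_cases hcase : m / q < N
    · rw [if_pos (by exact_mod_cast hcase)]
      have hmNq : m + 1 ≤ N * q := by
        have hs : (m / q + 1) * q = m / q * q + q := add_one_mul _ _
        have := Nat.mul_le_mul_right q (show m / q + 1 ≤ N from hcase)
        omega
      refine Prod.ext ?_ ?_
      · -- hands: the modify at m / q realises the take-(m+1) hands
        apply List.ext_getElem
        · simp
        · intro j hj1 hj2
          have hjN : j < N := by simpa using hj2
          rw [List.getElem_modify]
          simp only [List.getElem_map, List.getElem_range]
          by_cases hje : m / q = j
          · subst hje
            rw [if_pos rfl, gHand_mid dl q m (m / q) hjq1 hjq2 hm]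
          · rw [if_neg hje]
            rcases Nat.lt_or_ge j (m / q) with hlt | hge
            · have hle : j * q + q ≤ m := by
                have hs : (j + 1) * q = j * q + q := add_one_mul _ _
                have := Nat.mul_le_mul_right q (show j + 1 ≤ m / q from hlt)
                omega
              rw [gHand_of_le dl q (m + 1) j (by omega), gHand_of_le dl q m j hle]
            · have hge2 : m + 1 ≤ j * q := by
                have hs : (m / q + 1) * q = m / q * q + q := add_one_mul _ _
                have := Nat.mul_le_mul_right q (show m / q + 1 ≤ j from by omega)
                omega
              rw [gHand_of_ge dl q (m + 1) j hge2, gHand_of_ge dl q m j (by omega)]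
      · -- leftover unchanged: everything so far lands in a hand
        have h1 : (dl.take m).drop (N * q) = [] :=
          List.drop_eq_nil_of_le (by rw [hlen]; omega)
        have h2 : (dl.take (m + 1)).drop (N * q) = [] :=
          List.drop_eq_nil_of_le (by rw [List.length_take_of_le (by omega)]; omega)
        rw [htake] at h2
        show List.drop (N * q) (List.take m dl) = List.drop (N * q) (List.take m dl ++ [dl[m]])
        rw [h1, h2]
    · rw [if_neg (by exact_mod_cast hcase)]
      have hNm : N * q ≤ m := by
        have := Nat.mul_le_mul_right q (show N ≤ m / q from by omega)
        omega
      refine Prod.ext ?_ ?_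
      · -- hands unchanged: card m is past the last full hand
        apply List.map_congr_left
        intro j hj
        have hjN : j < N := List.mem_range.mp hj
        have hle : j * q + q ≤ m := by
          have hs : (j + 1) * q = j * q + q := add_one_mul _ _
          have := Nat.mul_le_mul_right q (show j + 1 ≤ N from hjN)
          omega
        rw [gHand_of_le dl q (m + 1) j (by omega), gHand_of_le dl q m j hle]
      · show List.drop (N * q) (List.take m dl) ++ [dl[m]] =
            List.drop (N * q) (List.take m dl ++ [dl[m]])
        rw [← htake, drop_take_succ dl (N * q) m hNm hm]

-- ===== VERDICT (by name: the statement is the Claim_ definition above) =====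
theorem deal_spec : Claim_equal_deal := by
  intro n deck _ hpre
  have hpre1 : 1 ≤ n := hpre
  obtain ⟨N, rfl⟩ : ∃ N : Nat, n = (N : Int) :=
    ⟨n.toNat, (Int.toNat_of_nonneg (by omega)).symm⟩
  unfold Spec_deal deal deal_alt
  simp only [PySem.Int.floordiv_natCast]
  set dl := deck.map (fun p => p.2) with hdl
  set qn := dl.length / N with hqn
  have hlen : deck.length = dl.length := by rw [hdl, List.length_map]
  rw [foldlA, hlen, ← hqn]
  by_cases hq0 : qn = 0
  · -- fewer cards than players: all hands empty, everything is leftover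
    rw [hq0]
    rw [if_pos (by simp)]
    refine Prod.ext ?_ ?_
    · simp only [Nat.cast_zero, mul_zero, slice_zero_zero, List.nil_append]
    · simp only [Nat.cast_zero, mul_zero, slice_zero_none]
  · have hqpos : 0 < qn := Nat.pos_of_ne_zero hq0
    have hNq : N * qn ≤ dl.length := by
      have := Nat.div_mul_le_self dl.length N
      calc N * qn = qn * N := Nat.mul_comm N qn
        _ = dl.length / N * N := by rw [hqn]
        _ ≤ dl.length := Nat.div_mul_le_self dl.length N
    rw [if_neg (by simp [hq0])]
    have hinv := deal_inv dl N qn hqpos dl.length le_rfl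
    rw [List.take_length] at hinv
    rw [initB, hinv]
    refine Prod.ext ?_ ?_
    · simp only [List.nil_append]
      rw [PySem.List.pyRange_one, List.map_map]
      apply List.map_congr_left
      intro j hj
      have hjN : j < N := List.mem_range.mp hj
      have hle : j * qn + qn ≤ dl.length := by
        have hs : (j + 1) * qn = j * qn + qn := add_one_mul _ _
        have := Nat.mul_le_mul_right qn (show j + 1 ≤ N from hjN)
        omega
      simp only [Function.comp_apply, zero_add]
      rw [sliceA dl j qn, gHand_of_le dl qn dl.length j hle]
    · show PySem.List.slice dl (some ((N : Int) * (qn : Int))) none = dl.drop (N * qn)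
      rw [sliceFrom dl N qn]
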